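-- pv_equiv track=rewrite | github.com/ehsanshahkakarh/primer_project | 18S_subset/src/validate_primers_pr2.py | find_primer_binding_exact
-- ===== SOURCE A (Python) =====
-- from typing import List, Tuple, Dict
--
-- def find_primer_binding_exact(seq: str, primer: str) -> List[int]:
--     """Find all exact match positions where primer binds (fast)."""
--     positions = []
--     primer_upper = primer.upper()
--     seq_upper = seq.upper()
--     start = 0
--     while True:
--         pos = seq_upper.find(primer_upper, start)
--         if pos == -1:
--             break
--         positions.append(pos)
--         start = pos + 1
--     return positions
-- ===== SOURCE B (Python) =====
-- def find_primer_binding_exact(seq: str, primer: str):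
--     """Find all exact match positions where primer binds (sliding-window scan)."""
--     seq_upper = seq.upper()
--     primer_upper = primer.upper()
--     m = len(primer_upper)
--     return [i for i in range(len(seq_upper) - m + 1)
--             if seq_upper[i:i + m] == primer_upper]
-- ===== Notes on version B (the rewrite author's own statement) =====
-- stated objective: simpler
-- what changed: Replaces A's stateful while-loop of repeated str.find calls restarting at pos+1 with a single comprehension over all window starts that compares each slice seq_upper[i:i+m] to the primer.
import Mathlib
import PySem

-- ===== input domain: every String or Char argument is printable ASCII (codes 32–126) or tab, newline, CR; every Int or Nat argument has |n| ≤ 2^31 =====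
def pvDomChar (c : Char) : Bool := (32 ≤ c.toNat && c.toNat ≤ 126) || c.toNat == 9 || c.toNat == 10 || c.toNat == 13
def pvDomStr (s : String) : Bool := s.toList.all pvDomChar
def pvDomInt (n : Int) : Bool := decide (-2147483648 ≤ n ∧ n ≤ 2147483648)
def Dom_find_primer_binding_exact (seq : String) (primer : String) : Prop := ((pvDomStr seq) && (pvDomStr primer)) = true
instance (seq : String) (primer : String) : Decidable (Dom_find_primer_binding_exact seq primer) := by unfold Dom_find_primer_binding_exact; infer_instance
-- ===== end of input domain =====

-- B replaces A's repeated str.find scanning loop by a single comprehension over all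
-- window starts comparing the slice to the primer (objective: simpler).

-- ===== PORT A =====
-- bound facts about findFrom, cited by pvLoopA's decreasing_by
theorem pvFindFrom_bounds (su pu : List Char) (k : Nat)
    (h : PySem.Chars.findFrom su pu (k : Int) none ≠ -1) :
    (k : Int) ≤ PySem.Chars.findFrom su pu (k : Int) none ∧
      PySem.Chars.findFrom su pu (k : Int) none ≤ (su.length : Int) := by
  by_cases hk : k ≤ su.length
  · refine ⟨(PySem.Chars.findFrom_natCast_spec su pu k hk h).1, ?_⟩
    rw [PySem.Chars.findFrom_natCast su pu k hk] at h ⊢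
    split_ifs at h ⊢ with h1
    · exact absurd rfl h
    · have h2 := PySem.Chars.find_le_length (su.drop k) pu
      rw [List.length_drop] at h2
      omega
  · exfalso
    apply h
    simp only [PySem.Chars.findFrom]
    have h0 : ¬ ((k : Int) < 0) := by omega
    have h1 : (su.length : Int) < (k : Int) := by omega
    simp [h0, h1]

-- A's while-loop: repeatedly find the primer from `start`, record matches
def pvLoopA (su pu : List Char) (start : Nat) (acc : List Int) : List Int :=
  let pos := PySem.Chars.findFrom su pu (start : Int) none
  if h : pos = -1 then acc
  else pvLoopA su pu (pos.toNat + 1) (acc ++ [pos])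
termination_by su.length + 1 - start
decreasing_by
  have hb := pvFindFrom_bounds su pu start h
  omega

def find_primer_binding_exact (seq : String) (primer : String) : List Int :=
  let primer_upper := PySem.Str.upper primer
  let seq_upper := PySem.Str.upper seq
  pvLoopA seq_upper.toList primer_upper.toList 0 []

-- ===== PORT B =====
def find_primer_binding_exact_alt (seq : String) (primer : String) : List Int :=
  let seq_upper := (PySem.Str.upper seq).toList
  let primer_upper := (PySem.Str.upper primer).toList
  let m := primer_upper.length
  (PySem.List.pyRange 0 ((seq_upper.length : Int) - (m : Int) + 1) 1).filter
    (fun i => PySem.Chars.slice seq_upper (some i) (some (i + (m : Int))) == primer_upper)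

-- ===== PRECONDITION & SPEC =====
def Spec_find_primer_binding_exact (seq : String) (primer : String) (out : List Int) : Prop := out = find_primer_binding_exact_alt seq primer
instance (seq : String) (primer : String) (out : List Int) : Decidable (Spec_find_primer_binding_exact seq primer out) := by unfold Spec_find_primer_binding_exact; infer_instance

-- ===== CLAIM (what is proved, stated in full; the proofs are below) =====
def Claim_equal_find_primer_binding_exact : Prop := ∀ (seq : String) (primer : String), Dom_find_primer_binding_exact seq primer → Spec_find_primer_binding_exact seq primer (find_primer_binding_exact seq primer)

-- ===== LEMMAS AND PROOFS =====

-- the sorted list of all match positions ≥ k, as integers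
def pvM (su pu : List Char) (k : Nat) : List Int :=
  ((List.range' k (su.length + 1 - k)).filter (fun i => decide (pu <+: su.drop i))).map
    (fun (i : Nat) => (i : Int))

theorem pvM_nil_of_none (su pu : List Char) (k : Nat) (hk : k ≤ su.length)
    (h : ¬ pu <:+: su.drop k) : pvM su pu k = [] := by
  unfold pvM
  rw [List.filter_eq_nil_iff.mpr, List.map_nil]
  intro i hi
  rw [List.mem_range'_1] at hi
  simp only [decide_eq_true_eq]
  intro hpre
  apply h
  rw [← PySem.Chars.isIn_iff_infix, ← PySem.Chars.exists_prefix_drop_iff_isIn]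
  refine ⟨i - k, ?_⟩
  rw [List.drop_drop]
  have hik : k + (i - k) = i := by omega
  rw [hik]
  exact hpre

theorem pvM_cons (su pu : List Char) (k p : Nat) (hkp : k ≤ p) (hp : p ≤ su.length)
    (hpre : pu <+: su.drop p)
    (hmin : ∀ i, k ≤ i → i < p → ¬ pu <+: su.drop i) :
    pvM su pu k = (p : Int) :: pvM su pu (p + 1) := by
  unfold pvM
  have hsplit : List.range' k (su.length + 1 - k) =
      List.range' k (p - k) ++ (List.range' p 1 ++ List.range' (p + 1) (su.length - p)) := by
    have ha : su.length + 1 - k = (p - k) + (1 + (su.length - p)) := by omega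
    rw [ha, ← List.range'_append]
    have hb1 : k + 1 * (p - k) = p := by omega
    rw [hb1, ← List.range'_append]
  rw [hsplit, List.filter_append, List.filter_append]
  have hnil : (List.range' k (p - k)).filter (fun i => decide (pu <+: su.drop i)) = [] := by
    rw [List.filter_eq_nil_iff]
    intro i hi
    rw [List.mem_range'_1] at hi
    simp only [decide_eq_true_eq]
    exact hmin i hi.1 (by omega)
  have hone : (List.range' p 1).filter (fun i => decide (pu <+: su.drop i)) = [p] := by
    simp [hpre]
  rw [hnil, hone]
  simp

theorem pvLoopA_eq (su pu : List Char) :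
    ∀ n k acc, su.length + 1 - k = n → pvLoopA su pu k acc = acc ++ pvM su pu k := by
  intro n
  induction n using Nat.strong_induction_on with
  | _ n ih =>
    intro k acc hn
    rw [pvLoopA]
    by_cases h : PySem.Chars.findFrom su pu (k : Int) none = -1
    · rw [dif_pos h]
      by_cases hk : k ≤ su.length
      · rw [pvM_nil_of_none su pu k hk
          ((PySem.Chars.findFrom_natCast_eq_neg_one_iff su pu k hk).mp h)]
        simp
      · have h0 : su.length + 1 - k = 0 := by omega
        simp [pvM, h0]
    · rw [dif_neg h]
      have hb := pvFindFrom_bounds su pu k h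
      have hk : k ≤ su.length := by omega
      have hspec := PySem.Chars.findFrom_natCast_spec su pu k hk h
      set pos := PySem.Chars.findFrom su pu (k : Int) none with hpos
      have hcast : pos = ((pos.toNat : Nat) : Int) := by omega
      have hkp : k ≤ pos.toNat := by omega
      have hp : pos.toNat ≤ su.length := by omega
      rw [ih (su.length + 1 - (pos.toNat + 1)) (by omega) (pos.toNat + 1) (acc ++ [pos]) rfl]
      rw [pvM_cons su pu k pos.toNat hkp hp hspec.2.1
        (fun i h1 h2 => hspec.2.2 i h1 h2)]
      rw [hcast]
      simp

theorem pvAlt_eq (su pu : List Char) :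
    (PySem.List.pyRange 0 ((su.length : Int) - (pu.length : Int) + 1) 1).filter
      (fun i => PySem.Chars.slice su (some i) (some (i + (pu.length : Int))) == pu)
      = pvM su pu 0 := by
  by_cases hm : pu.length ≤ su.length
  · have hb : ((su.length : Int) - (pu.length : Int) + 1) - 0 = ((su.length - pu.length + 1 : Nat) : Int) := by
      push_cast; omega
    rw [PySem.List.pyRange_one, hb, Int.toNat_natCast]
    simp only [zero_add]
    rw [List.filter_map]
    unfold pvM
    have hsplit : List.range' 0 (su.length + 1 - 0) =
        List.range (su.length - pu.length + 1) ++
          List.range' (su.length - pu.length + 1) pu.length := by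
      rw [List.range_eq_range']
      have ha : su.length + 1 - 0 = (su.length - pu.length + 1) + pu.length := by omega
      rw [ha, ← List.range'_append]
      have hb1 : 0 + 1 * (su.length - pu.length + 1) = su.length - pu.length + 1 := by omega
      rw [hb1]
    rw [hsplit, List.filter_append]
    have hnil : (List.range' (su.length - pu.length + 1) pu.length).filter
        (fun i => decide (pu <+: su.drop i)) = [] := by
      rw [List.filter_eq_nil_iff]
      intro i hi
      rw [List.mem_range'_1] at hi
      simp only [decide_eq_true_eq]
      intro hpre
      have hlen := hpre.length_le
      rw [List.length_drop] at hlen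
      omega
    rw [hnil, List.append_nil]
    congr 1
    apply List.filter_congr
    intro i hi
    rw [List.mem_range] at hi
    have hslice : PySem.Chars.slice su (some (i : Int))
        (some ((i : Int) + (pu.length : Int))) = (su.drop i).take pu.length := by
      simp only [PySem.Chars.slice_eq_listSlice]
      exact PySem.List.slice_natCast_add su i pu.length
    simp only [Function.comp_apply, hslice]
    have htake : (su.drop i).take pu.length = pu ↔ pu <+: su.drop i := by
      constructor
      · intro h; rw [← h]; exact List.take_prefix _ _
      · intro h
        exact (List.prefix_iff_eq_take.mp h).symm
    by_cases hpf : pu <+: List.drop i su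
    · have h1 : List.take pu.length (List.drop i su) = pu := htake.mpr hpf
      simp [hpf, h1]
    · have h1 : List.take pu.length (List.drop i su) ≠ pu := fun h => hpf (htake.mp h)
      simp [hpf, h1]
  · have hb : (su.length : Int) - (pu.length : Int) + 1 ≤ 0 := by omega
    rw [PySem.List.pyRange_one_eq_nil hb]
    unfold pvM
    have hMnil : (List.range' 0 (su.length + 1 - 0)).filter
        (fun i => decide (pu <+: su.drop i)) = [] := by
      rw [List.filter_eq_nil_iff]
      intro i hi
      rw [List.mem_range'_1] at hi
      simp only [decide_eq_true_eq]
      intro hpre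
      have hlen := hpre.length_le
      rw [List.length_drop] at hlen
      omega
    rw [hMnil]
    simp

-- ===== VERDICT (by name: the statement is the Claim_ definition above) =====
theorem find_primer_binding_exact_spec : Claim_equal_find_primer_binding_exact := by
  intro seq primer _
  unfold Spec_find_primer_binding_exact find_primer_binding_exact find_primer_binding_exact_alt
  simp only []
  rw [pvLoopA_eq _ _ ((PySem.Str.upper seq).toList.length + 1 - 0) 0 [] rfl,
    pvAlt_eq]
  simp
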